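-- pv_equiv track=rewrite | github.com/summer2293/algorithm-study | src/programmers/jichang/week1/test_모의고사.py | who_solved_the_most_problems
-- ===== SOURCE A (Python) =====
-- def who_solved_the_most_problems(answers):
--     """가장 많은 문제를 맞춘 사람을 구한다.
--
--     시간 복잡도:
--     answer의 길이가 n, 수포자의 수를 m이라고 할 때
--     O(n + m)
--     """
--     the_answers_of_first_person = [1, 2, 3, 4, 5, 1, 2, 3, 4, 5]
--     the_answers_of_second_person = [2, 1, 2, 3, 2, 4, 2, 5]
--     the_answers_of_third_person = [3, 3, 1, 1, 2, 2, 4, 4, 5, 5]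
--
--     persons = [0, 0, 0]
--
--     for index in range(len(answers)):
--         if the_answers_of_first_person[index % 10] == answers[index]:
--             persons[0] += 1
--         if the_answers_of_second_person[index % 8] == answers[index]:
--             persons[1] += 1
--         if the_answers_of_third_person[index % 10] == answers[index]:
--             persons[2] += 1
--
--     top_score_person = []
--     for person in range(len(persons)):
--         if persons[person] == max(persons):
--             top_score_person.append(person+1)
--
--     return top_score_person
-- ===== SOURCE B (Python) =====
-- def who_solved_the_most_problems(answers):
--     patterns = [[1, 2, 3, 4, 5], [2, 1, 2, 3, 2, 4, 2, 5], [3, 3, 1, 1, 2, 2, 4, 4, 5, 5]]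
--     hist = {}
--     for i, a in enumerate(answers):
--         key = (i % 40, a)
--         hist[key] = hist.get(key, 0) + 1
--     scores = [sum(hist.get((r, p[r % len(p)]), 0) for r in range(40)) for p in patterns]
--     best = max(scores)
--     return [k + 1 for k, s in enumerate(scores) if s == best]
-- ===== Notes on version B (the rewrite author's own statement) =====
-- stated objective: alternative
-- what changed: Replaces A's per-index loop that compares each answer against the three patterns directly with a bucketing algorithm: one pass builds a histogram keyed by (index % 40, answer) (40 = lcm of the cycle lengths 10, 8, 10), and each person's score is then read off the 40-entry table alone without rescanning the answers; the result list comes from a comprehension over enumerate(scores) instead of A's range loop with appends.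
import Mathlib
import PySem

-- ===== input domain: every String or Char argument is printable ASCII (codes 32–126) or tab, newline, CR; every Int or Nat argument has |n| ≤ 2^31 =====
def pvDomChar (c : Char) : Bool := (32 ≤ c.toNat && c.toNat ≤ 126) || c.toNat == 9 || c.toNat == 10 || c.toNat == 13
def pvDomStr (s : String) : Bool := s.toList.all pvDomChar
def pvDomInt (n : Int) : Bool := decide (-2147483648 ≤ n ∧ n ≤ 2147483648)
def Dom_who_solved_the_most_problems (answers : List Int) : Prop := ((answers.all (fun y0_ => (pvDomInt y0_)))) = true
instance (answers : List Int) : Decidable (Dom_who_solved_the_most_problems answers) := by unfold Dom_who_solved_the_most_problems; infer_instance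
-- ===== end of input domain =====

-- B replaces A's per-index three-way comparison loop by a bucketing algorithm: one
-- pass builds a histogram keyed by (index % 40, answer), and each score is read off
-- that 40-entry table without rescanning the answers; alternative decomposition.

-- ===== PORT A =====
def pvA1 : List Int := [1, 2, 3, 4, 5, 1, 2, 3, 4, 5]
def pvA2 : List Int := [2, 1, 2, 3, 2, 4, 2, 5]
def pvA3 : List Int := [3, 3, 1, 1, 2, 2, 4, 4, 5, 5]

-- A's loop 'for index in range(len(answers))' reads answers[index] for index = 0..n-1
-- in order; ported as structural recursion over answers carrying the index (exact).
def pvALoop : List Int → Nat → Int × Int × Int → Int × Int × Int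
  | [], _, p => p
  | a :: rest, idx, (c1, c2, c3) =>
      pvALoop rest (idx + 1)
        ((if pvA1.getD (idx % 10) 0 = a then c1 + 1 else c1),
         (if pvA2.getD (idx % 8) 0 = a then c2 + 1 else c2),
         (if pvA3.getD (idx % 10) 0 = a then c3 + 1 else c3))

def who_solved_the_most_problems (answers : List Int) : List Int :=
  let ps := pvALoop answers 0 (0, 0, 0)
  let persons : List Int := [ps.1, ps.2.1, ps.2.2]
  let m := (PySem.List.max? persons (fun x => x)).getD 0
  (PySem.List.pyRange 0 persons.length 1).foldl
    (fun acc person =>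
      if PySem.List.pyGetD persons person 0 = m then acc ++ [person + 1] else acc) []

-- ===== PORT B =====
-- hist[key] = hist.get(key, 0) + 1 over enumerate(answers), key = (i % 40, a)
def pvHist (answers : List Int) : PySem.Dict (Int × Int) Int :=
  (PySem.List.enumerate answers 0).foldl
    (fun d ia =>
      d.insert (PySem.Int.mod ia.1 40, ia.2)
        (d.getD (PySem.Int.mod ia.1 40, ia.2) 0 + 1)) PySem.Dict.empty

-- sum(hist.get((r, p[r % len(p)]), 0) for r in range(40))
def pvBScore (hist : PySem.Dict (Int × Int) Int) (p : List Int) : Int :=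
  ((PySem.List.pyRange 0 40 1).map
    (fun r => hist.getD (r, PySem.List.pyGetD p (PySem.Int.mod r p.length) 0) 0)).sum

def who_solved_the_most_problems_alt (answers : List Int) : List Int :=
  let patterns : List (List Int) :=
    [[1, 2, 3, 4, 5], [2, 1, 2, 3, 2, 4, 2, 5], [3, 3, 1, 1, 2, 2, 4, 4, 5, 5]]
  let hist := pvHist answers
  let scores := patterns.map (fun p => pvBScore hist p)
  let best := (PySem.List.max? scores (fun x => x)).getD 0
  ((PySem.List.enumerate scores 0).filter (fun is => is.2 == best)).map (fun is => is.1 + 1)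

-- ===== PRECONDITION & SPEC =====
def Spec_who_solved_the_most_problems (answers : List Int) (out : List Int) : Prop := out = who_solved_the_most_problems_alt answers
instance (answers : List Int) (out : List Int) : Decidable (Spec_who_solved_the_most_problems answers out) := by unfold Spec_who_solved_the_most_problems; infer_instance

-- ===== CLAIM (what is proved, stated in full; the proofs are below) =====
def Claim_equal_who_solved_the_most_problems : Prop := ∀ (answers : List Int), Dom_who_solved_the_most_problems answers → Spec_who_solved_the_most_problems answers (who_solved_the_most_problems answers)

-- ===== LEMMAS AND PROOFS =====

-- the list of histogram keys (i % 40, a) produced by B's building pass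
def pvKeys : List Int → Nat → List (Int × Int)
  | [], _ => []
  | a :: rest, i => (((i % 40 : Nat) : Int), a) :: pvKeys rest (i + 1)

theorem pvKeys_eq (xs : List Int) (n : Nat) :
    (PySem.List.enumerate xs (n : Int)).map (fun ia => (PySem.Int.mod ia.1 40, ia.2))
      = pvKeys xs n := by
  induction xs generalizing n with
  | nil => simp [pvKeys, PySem.List.enumerate_nil]
  | cons a rest ih =>
    rw [PySem.List.enumerate_cons]
    have hsucc : ((n : Int) + 1) = ((n + 1 : Nat) : Int) := by push_cast; ring
    have hm : PySem.Int.mod (n : Int) ((40 : Nat) : Int) = ((n % 40 : Nat) : Int) :=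
      PySem.Int.mod_natCast n 40
    simp only [List.map_cons, hsucc, ih, pvKeys]
    norm_num at hm ⊢

theorem pvHist_getD (answers : List Int) (k : Int × Int) :
    (pvHist answers).getD k 0 = ((pvKeys answers 0).count k : Int) := by
  have hf := List.foldl_map (f := fun ia : Int × Int => (PySem.Int.mod ia.1 40, ia.2))
    (g := fun (d : PySem.Dict (Int × Int) Int) kk => d.insert kk (d.getD kk 0 + 1))
    (l := PySem.List.enumerate answers 0) (init := (PySem.Dict.empty : PySem.Dict (Int × Int) Int))
  have h := PySem.Dict.getD_foldl_insert_add_one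
    (l := (PySem.List.enumerate answers 0).map (fun ia => (PySem.Int.mod ia.1 40, ia.2)))
    (d := (PySem.Dict.empty : PySem.Dict (Int × Int) Int)) (v := k)
  rw [hf] at h
  have hk := pvKeys_eq answers 0
  simp only [Nat.cast_zero] at hk
  unfold pvHist
  rw [h, hk]
  simp

-- count of matches of pattern p against xs starting at index i (cyclic by p.length)
def pvCnt (p : List Int) : List Int → Nat → Int
  | [], _ => 0
  | a :: rest, i => (if p.getD (i % p.length) 0 = a then 1 else 0) + pvCnt p rest (i + 1)

theorem mem_R40 (k : Nat) (h : k < 40) : ((k : Int)) ∈ PySem.List.pyRange 0 40 1 := by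
  interval_cases k <;> decide

-- sum over a Nodup list of an indicator that fires only at m
theorem sum_ite_not_mem (l : List Int) (m : Int) (hm : m ∉ l) (f : Int → Int) (a : Int) :
    (l.map (fun r => if r = m ∧ f r = a then (1 : Int) else 0)).sum = 0 := by
  induction l with
  | nil => simp
  | cons x t ih =>
    simp only [List.mem_cons, not_or] at hm
    simp only [List.map_cons, List.sum_cons, ih hm.2]
    rw [if_neg (by rintro ⟨rfl, _⟩; exact hm.1 rfl)]
    ring

theorem sum_ite_mem (l : List Int) (hl : l.Nodup) (m : Int) (hm : m ∈ l)
    (f : Int → Int) (a : Int) :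
    (l.map (fun r => if r = m ∧ f r = a then (1 : Int) else 0)).sum
      = if f m = a then 1 else 0 := by
  induction l with
  | nil => cases hm
  | cons x t ih =>
    rcases List.mem_cons.1 hm with rfl | hmt
    · simp only [List.map_cons, List.sum_cons]
      rw [sum_ite_not_mem t m (List.nodup_cons.1 hl).1 f a]
      simp
    · have hx : x ≠ m := by rintro rfl; exact (List.nodup_cons.1 hl).1 hmt
      simp only [List.map_cons, List.sum_cons, ih (List.nodup_cons.1 hl).2 hmt]
      rw [if_neg (by rintro ⟨rfl, _⟩; exact hx rfl)]
      ring

-- B's table sum for pattern p equals the cyclic match count, provided p's indexing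
-- through r % 40 agrees with direct indexing (true for cycle lengths dividing 40)
theorem pvTableSum_eq (p : List Int)
    (hp : ∀ n : Nat, PySem.List.pyGetD p (PySem.Int.mod ((n % 40 : Nat) : Int) p.length) 0
            = p.getD (n % p.length) 0)
    (xs : List Int) (n : Nat) :
    ((PySem.List.pyRange 0 40 1).map
      (fun r => ((pvKeys xs n).count (r, PySem.List.pyGetD p (PySem.Int.mod r p.length) 0) : Int))).sum
    = pvCnt p xs n := by
  induction xs generalizing n with
  | nil => simp [pvKeys, pvCnt]
  | cons a rest ih =>
    simp only [pvKeys, pvCnt]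
    have hcnt : ∀ r v, ((((((n % 40 : Nat) : Int), a) :: pvKeys rest (n + 1)).count (r, v) : Nat) : Int)
        = ((pvKeys rest (n + 1)).count (r, v) : Int)
          + (if r = ((n % 40 : Nat) : Int) ∧ v = a then 1 else 0) := by
      intro r v
      rw [List.count_cons]
      by_cases h : (r, v) = (((n % 40 : Nat) : Int), a)
      · rw [if_pos (beq_iff_eq.mpr h.symm), if_pos (by simpa [Prod.ext_iff] using h)]
        push_cast
        ring
      · rw [if_neg (fun hc => h (beq_iff_eq.mp hc).symm), if_neg (by rintro ⟨rfl, rfl⟩; exact h rfl)]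
        push_cast
        ring
    have hsplit :
        ((PySem.List.pyRange 0 40 1).map
          (fun r => (((((n % 40 : Nat) : Int), a) :: pvKeys rest (n + 1)).count
            (r, PySem.List.pyGetD p (PySem.Int.mod r p.length) 0) : Int))).sum
        = ((PySem.List.pyRange 0 40 1).map
            (fun r => ((pvKeys rest (n + 1)).count (r, PySem.List.pyGetD p (PySem.Int.mod r p.length) 0) : Int))).sum
          + ((PySem.List.pyRange 0 40 1).map
            (fun r => if r = ((n % 40 : Nat) : Int) ∧ PySem.List.pyGetD p (PySem.Int.mod r p.length) 0 = a then (1 : Int) else 0)).sum := by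
      rw [← List.sum_map_add]
      apply congrArg
      apply List.map_congr_left
      intro r _
      rw [hcnt r _]
    rw [hsplit, ih]
    rw [sum_ite_mem _ (by decide) _ (mem_R40 (n % 40) (Nat.mod_lt _ (by norm_num))) _ a]
    rw [hp n]
    ring

-- cyclic indexing through r % 40 agrees with direct indexing when the cycle length divides 40
theorem pv_hp (p : List Int) (hd : p.length ∣ 40) (n : Nat) :
    PySem.List.pyGetD p (PySem.Int.mod ((n % 40 : Nat) : Int) p.length) 0
      = p.getD (n % p.length) 0 := by
  rw [show ((p.length : Nat) : Int) = ((p.length : Nat) : Int) from rfl,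
    PySem.Int.mod_natCast, PySem.List.pyGetD_natCast]
  rw [Nat.mod_mod_of_dvd n hd]

theorem pvBScore_eq (p : List Int) (hd : p.length ∣ 40) (answers : List Int) :
    pvBScore (pvHist answers) p = pvCnt p answers 0 := by
  unfold pvBScore
  have hmap :
      ((PySem.List.pyRange 0 40 1).map
        (fun r => (pvHist answers).getD (r, PySem.List.pyGetD p (PySem.Int.mod r p.length) 0) 0))
      = ((PySem.List.pyRange 0 40 1).map
        (fun r => ((pvKeys answers 0).count (r, PySem.List.pyGetD p (PySem.Int.mod r p.length) 0) : Int))) := by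
    apply List.map_congr_left
    intro r _
    exact pvHist_getD answers _
  rw [hmap, pvTableSum_eq p (pv_hp p hd) answers 0]

theorem pv1_agree (i : Nat) :
    pvA1.getD (i % 10) 0 = ([1, 2, 3, 4, 5] : List Int).getD (i % 5) 0 := by
  have h5 : i % 5 = (i % 10) % 5 := (Nat.mod_mod_of_dvd i (by norm_num)).symm
  rw [h5]
  have h : i % 10 < 10 := Nat.mod_lt _ (by norm_num)
  interval_cases (i % 10) <;> decide

theorem pvALoop_eq (xs : List Int) (i : Nat) (c1 c2 c3 : Int) :
    pvALoop xs i (c1, c2, c3) =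
      (c1 + pvCnt [1, 2, 3, 4, 5] xs i, c2 + pvCnt pvA2 xs i, c3 + pvCnt pvA3 xs i) := by
  induction xs generalizing i c1 c2 c3 with
  | nil => simp [pvALoop, pvCnt]
  | cons a rest ih =>
    simp only [pvALoop, ih, pvCnt]
    have h1 := pv1_agree i
    have h2 : pvA2.length = 8 := by decide
    have h3 : pvA3.length = 10 := by decide
    have hl : ([1, 2, 3, 4, 5] : List Int).length = 5 := rfl
    rw [h2, h3, hl]
    simp only [Prod.mk.injEq]
    refine ⟨?_, ?_, ?_⟩
    · rw [← h1]; split_ifs <;> ring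
    · split_ifs <;> ring
    · split_ifs <;> ring

-- final-stage equality: A's range-over-persons loop vs B's enumerate/filter/map
theorem pv_final_eq (s1 s2 s3 : Int) :
    (PySem.List.pyRange 0 ([s1, s2, s3] : List Int).length 1).foldl
      (fun acc person =>
        if PySem.List.pyGetD [s1, s2, s3] person 0
            = ((PySem.List.max? [s1, s2, s3] (fun x => x)).getD 0) then acc ++ [person + 1] else acc) []
    = ((PySem.List.enumerate ([s1, s2, s3] : List Int) 0).filter
        (fun is => is.2 == ((PySem.List.max? [s1, s2, s3] (fun x => x)).getD 0))).map
        (fun is => is.1 + 1) := by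
  have hm : PySem.List.max? ([s1, s2, s3] : List Int) (fun x => x)
      = some (([s2, s3] : List Int).foldl max s1) := PySem.List.max?_id_cons s1 [s2, s3]
  rw [hm]
  have hr3 : PySem.List.pyRange 0 (3 : Int) 1 = [0, 1, 2] := by decide
  have g0 : PySem.List.pyGetD ([s1, s2, s3] : List Int) 0 0 = s1 := by
    simp [PySem.List.pyGetD_zero_cons]
  have g1 : PySem.List.pyGetD ([s1, s2, s3] : List Int) 1 0 = s2 := by
    have h := PySem.List.pyGetD_natCast (xs := ([s1, s2, s3] : List Int)) (n := 1) (d := 0)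
    simpa using h
  have g2 : PySem.List.pyGetD ([s1, s2, s3] : List Int) 2 0 = s3 := by
    have h := PySem.List.pyGetD_natCast (xs := ([s1, s2, s3] : List Int)) (n := 2) (d := 0)
    simpa using h
  simp only [List.length_cons, List.length_nil, Option.getD_some]
  rw [show (((0 + 1 + 1 + 1 : Nat)) : Int) = 3 from by norm_num, hr3]
  simp only [List.foldl, g0, g1, g2, PySem.List.enumerate_cons, PySem.List.enumerate_nil,
    List.filter_cons, List.filter_nil, beq_iff_eq]
  split_ifs <;> norm_num

-- ===== VERDICT (by name: the statement is the Claim_ definition above) =====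
theorem who_solved_the_most_problems_spec : Claim_equal_who_solved_the_most_problems := by
  intro answers _
  unfold Spec_who_solved_the_most_problems
  unfold who_solved_the_most_problems who_solved_the_most_problems_alt
  simp only [List.map_cons, List.map_nil]
  rw [pvBScore_eq _ (by decide) answers, pvBScore_eq _ (by decide) answers,
    pvBScore_eq _ (by decide) answers]
  rw [pvALoop_eq]
  simp only [zero_add, show ([2, 1, 2, 3, 2, 4, 2, 5] : List Int) = pvA2 from rfl,
    show ([3, 3, 1, 1, 2, 2, 4, 4, 5, 5] : List Int) = pvA3 from rfl]
  exact pv_final_eq _ _ _
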